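-- pv_equiv track=rewrite | github.com/DocKlaus/PyTorch | combinations.py | combo_from_recurs
-- ===== SOURCE A (Python) =====
-- def combo_from_recurs(product_in: list[int], length: int) -> list[list[int]]:
--     """ Разворот itertools"""
--
--     base = len(product_in)
--     total = base ** length
--
--     combinations = []
--     for i in range(total):
--         combo = []
--         num = i
--         for _ in range(length):
--             combo.append(product_in[num % base])
--             num = num // base
--         combinations.append(combo[::-1])
--     return combinations
-- ===== SOURCE B (Python) =====
-- def combo_from_recurs(product_in: list[int], length: int) -> list[list[int]]:
--     """Build the Cartesian product incrementally: extend each partial combo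
--     by every element, length times (instead of decoding integer indices)."""
--     result = [[]]
--     for _ in range(length):
--         result = [partial + [x] for partial in result for x in product_in]
--     return result
-- ===== Notes on version B (the rewrite author's own statement) =====
-- stated objective: simpler
-- what changed: B builds the product incrementally (result starts as [[]] and is extended element-by-element length times) instead of decoding each index of range(base**length) as a base-`base` odometer and reversing its digit list.
import Mathlib
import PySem

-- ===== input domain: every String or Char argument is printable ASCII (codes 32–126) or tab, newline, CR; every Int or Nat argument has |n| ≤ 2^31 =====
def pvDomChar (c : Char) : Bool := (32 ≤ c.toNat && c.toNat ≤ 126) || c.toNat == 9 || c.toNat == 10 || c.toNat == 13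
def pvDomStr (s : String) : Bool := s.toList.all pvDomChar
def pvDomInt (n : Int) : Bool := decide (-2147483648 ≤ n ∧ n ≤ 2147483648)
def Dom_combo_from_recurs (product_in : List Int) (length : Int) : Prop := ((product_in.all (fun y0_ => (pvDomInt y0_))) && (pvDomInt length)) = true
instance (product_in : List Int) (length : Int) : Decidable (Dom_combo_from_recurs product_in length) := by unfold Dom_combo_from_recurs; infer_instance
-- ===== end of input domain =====

-- B builds the product incrementally (extend each partial combo by every element,
-- length times) instead of A's decoding of every index in range(base**length) as a
-- base-`base` digit string; objective: simpler.

-- ===== PORT A =====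
-- base ** length: exact for 0 ≤ length (Pre_); Python raises for negative length.
def combo_from_recurs (product_in : List Int) (length : Int) : List (List Int) :=
  let base : Int := product_in.length
  let total : Int := base ^ length.toNat
  (PySem.List.pyRange 0 total 1).foldl
    (fun combinations i =>
      let st := (PySem.List.pyRange 0 length 1).foldl
        (fun (st : List Int × Int) _ =>
          (st.1 ++ [PySem.List.pyGetD product_in (PySem.Int.mod st.2 base) 0],
           PySem.Int.floordiv st.2 base)) ([], i)
      combinations ++ [st.1.reverse]) []

-- ===== PORT B =====
def combo_from_recurs_alt (product_in : List Int) (length : Int) : List (List Int) :=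
  (PySem.List.pyRange 0 length 1).foldl
    (fun result _ => result.flatMap (fun p => product_in.map (fun x => p ++ [x])))
    [[]]

-- ===== PRECONDITION & SPEC =====
-- Pre_ excludes length < 0, where Python A raises (TypeError / ZeroDivisionError
-- from base ** negative length).
def Pre_combo_from_recurs (product_in : List Int) (length : Int) : Prop := 0 ≤ length
instance (product_in : List Int) (length : Int) : Decidable (Pre_combo_from_recurs product_in length) := by unfold Pre_combo_from_recurs; infer_instance
def pvWitness_combo_from_recurs : List Int × Int := ([1, 2, 3], 2)

def Spec_combo_from_recurs (product_in : List Int) (length : Int) (out : List (List Int)) : Prop := out = combo_from_recurs_alt product_in length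
instance (product_in : List Int) (length : Int) (out : List (List Int)) : Decidable (Spec_combo_from_recurs product_in length out) := by unfold Spec_combo_from_recurs; infer_instance

-- ===== CLAIM (what is proved, stated in full; the proofs are below) =====
def Claim_equal_combo_from_recurs : Prop := ∀ (product_in : List Int) (length : Int), Dom_combo_from_recurs product_in length → Pre_combo_from_recurs product_in length → Spec_combo_from_recurs product_in length (combo_from_recurs product_in length)

-- ===== LEMMAS AND PROOFS =====

-- one B step: extend every partial combo by every element
def stepB (xs : List Int) (res : List (List Int)) : List (List Int) :=
  res.flatMap (fun p => xs.map (fun x => p ++ [x]))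

-- the product after n B steps
def prodN (xs : List Int) : Nat → List (List Int)
  | 0 => [[]]
  | n + 1 => stepB xs (prodN xs n)

-- A's digit list for index i with n digits (least significant first)
def digitsA (xs : List Int) : Nat → Int → List Int
  | 0, _ => []
  | n + 1, i =>
      PySem.List.pyGetD xs (PySem.Int.mod i xs.length) 0 ::
        digitsA xs n (PySem.Int.floordiv i xs.length)

lemma foldl_stepB (xs : List Int) : ∀ (l : List Int) (k : Nat),
    l.foldl (fun r _ => stepB xs r) (prodN xs k) = prodN xs (l.length + k) := by
  intro l
  induction l with
  | nil => intro k; simp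
  | cons a l ih =>
      intro k
      have h : stepB xs (prodN xs k) = prodN xs (k + 1) := rfl
      simp only [List.foldl_cons, h, ih, List.length_cons]
      congr 1; omega

lemma alt_eq_prodN (xs : List Int) (length : Int) (h : 0 ≤ length) :
    combo_from_recurs_alt xs length = prodN xs length.toNat := by
  unfold combo_from_recurs_alt
  have h0 : ([([] : List Int)]) = prodN xs 0 := rfl
  rw [h0]
  have := foldl_stepB xs (PySem.List.pyRange 0 length 1) 0
  simp only [stepB] at this
  rw [this]
  simp [PySem.List.length_pyRange_one]

lemma inner_fold (xs : List Int) : ∀ (l : List Int) (acc : List Int) (i : Int),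
    (l.foldl
      (fun (st : List Int × Int) _ =>
        (st.1 ++ [PySem.List.pyGetD xs (PySem.Int.mod st.2 (xs.length : Int)) 0],
         PySem.Int.floordiv st.2 (xs.length : Int))) (acc, i)).1
      = acc ++ digitsA xs l.length i := by
  intro l
  induction l with
  | nil => intro acc i; simp [digitsA]
  | cons a l ih =>
      intro acc i
      simp only [List.foldl_cons, ih, List.length_cons, digitsA, List.append_assoc,
        List.singleton_append]

lemma foldl_append_singleton {α β : Type} (g : α → β) :
    ∀ (l : List α) (acc : List β),
      l.foldl (fun r i => r ++ [g i]) acc = acc ++ l.map g := by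
  intro l
  induction l with
  | nil => intro acc; simp
  | cons a l ih => intro acc; simp [ih]

lemma range_mul_flatMap (b : Nat) : ∀ (m : Nat),
    List.range (m * b) =
      (List.range m).flatMap (fun q => (List.range b).map (fun r => q * b + r)) := by
  intro m
  induction m with
  | zero => simp
  | succ m ih =>
      have h : (m + 1) * b = m * b + b := by ring
      rw [h, List.range_add, ih, List.range_succ, List.flatMap_append]
      simp

lemma map_getD_range (xs : List Int) :
    (List.range xs.length).map (fun r => xs.getD r 0) = xs := by
  apply List.ext_getElem
  · simp
  · intro i h1 h2
    simp [List.getD_eq_getElem?_getD, List.getElem?_eq_getElem h2]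

lemma digitsA_succ_decode (xs : List Int) (n q r : Nat) (hr : r < xs.length) :
    digitsA xs (n + 1) ((q * xs.length + r : Nat) : Int)
      = xs.getD r 0 :: digitsA xs n ((q : Nat) : Int) := by
  have hmod : PySem.Int.mod ((q * xs.length + r : Nat) : Int) (xs.length : Int)
      = (((q * xs.length + r) % xs.length : Nat) : Int) := PySem.Int.mod_natCast _ _
  have hdiv : PySem.Int.floordiv ((q * xs.length + r : Nat) : Int) (xs.length : Int)
      = (((q * xs.length + r) / xs.length : Nat) : Int) := PySem.Int.floordiv_natCast _ _
  have h1 : (q * xs.length + r) % xs.length = r := by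
    rw [mul_comm q xs.length, Nat.mul_add_mod, Nat.mod_eq_of_lt hr]
  have h2 : (q * xs.length + r) / xs.length = q := by
    rw [mul_comm, Nat.mul_add_div (by omega), Nat.div_eq_of_lt hr]
    omega
  simp only [digitsA]
  rw [hmod, hdiv, h1, h2]
  simp

lemma main_decode (xs : List Int) : ∀ (n : Nat),
    (List.range (xs.length ^ n)).map
        (fun (k : Nat) => (digitsA xs n ((k : Nat) : Int)).reverse)
      = prodN xs n := by
  intro n
  induction n with
  | zero => simp [digitsA, prodN]
  | succ n ih =>
      have hpow : xs.length ^ (n + 1) = xs.length ^ n * xs.length := by ring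
      have hstep : prodN xs (n + 1) = stepB xs (prodN xs n) := rfl
      rw [hpow, range_mul_flatMap, List.map_flatMap, hstep, ← ih, stepB,
        List.flatMap_map]
      congr 1
      funext q
      simp only [List.map_map]
      have hcong : ∀ r ∈ List.range xs.length,
          ((fun (k : Nat) => (digitsA xs (n + 1) ((k : Nat) : Int)).reverse) ∘
            fun r => q * xs.length + r) r
            = (digitsA xs n ((q : Nat) : Int)).reverse ++ [xs.getD r 0] := by
        intro r hr
        simp only [Function.comp]
        rw [digitsA_succ_decode xs n q r (List.mem_range.mp hr)]
        simp
      rw [List.map_congr_left hcong,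
        show (fun r => (digitsA xs n ((q : Nat) : Int)).reverse ++ [xs.getD r 0])
            = (fun y => (digitsA xs n ((q : Nat) : Int)).reverse ++ [y]) ∘
              (fun r => xs.getD r 0) from rfl,
        ← List.map_map, map_getD_range]

-- ===== VERDICT (by name: the statement is the Claim_ definition above) =====
theorem combo_from_recurs_spec : Claim_equal_combo_from_recurs := by
  intro xs length _ hpre
  unfold Spec_combo_from_recurs
  rw [alt_eq_prodN xs length hpre]
  unfold combo_from_recurs
  simp only []
  have hlen : (PySem.List.pyRange 0 length 1).length = length.toNat := by
    rw [PySem.List.length_pyRange_one]; simp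
  rw [foldl_append_singleton (fun i : Int =>
    ((PySem.List.pyRange 0 length 1).foldl
      (fun (st : List Int × Int) _ =>
        (st.1 ++ [PySem.List.pyGetD xs (PySem.Int.mod st.2 (xs.length : Int)) 0],
         PySem.Int.floordiv st.2 (xs.length : Int))) ([], i)).1.reverse)]
  rw [List.nil_append]
  have hg : ∀ i ∈ PySem.List.pyRange 0 ((xs.length : Int) ^ length.toNat) 1,
      (fun i : Int =>
        ((PySem.List.pyRange 0 length 1).foldl
          (fun (st : List Int × Int) _ =>
            (st.1 ++ [PySem.List.pyGetD xs (PySem.Int.mod st.2 (xs.length : Int)) 0],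
             PySem.Int.floordiv st.2 (xs.length : Int))) ([], i)).1.reverse) i
        = (digitsA xs length.toNat i).reverse := by
    intro i _
    simp only []
    rw [inner_fold xs (PySem.List.pyRange 0 length 1) [] i, hlen, List.nil_append]
  rw [List.map_congr_left hg, PySem.List.pyRange_one]
  have htot : (((xs.length : Int) ^ length.toNat - 0)).toNat
      = xs.length ^ length.toNat := by
    rw [sub_zero, show ((xs.length : Int) ^ length.toNat)
        = ((xs.length ^ length.toNat : Nat) : Int) by push_cast; ring,
      Int.toNat_natCast]
  rw [htot, List.map_map]
  have : ((fun i : Int => (digitsA xs length.toNat i).reverse) ∘ fun k : Nat => 0 + (k : Int))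
      = fun (k : Nat) => (digitsA xs length.toNat ((k : Nat) : Int)).reverse := by
    funext k; simp
  rw [this]
  exact main_decode xs length.toNat
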